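-- pv_equiv track=rewrite | github.com/nguyenddat/ript-virtual-recep | server/app/services/AppointmentManager.py | strip_static_path
-- ===== SOURCE A (Python) =====
-- def strip_static_path(path):
--     path = path.replace("\\", "/")
--     static_path = []
--     before_static = True
--     for direc in path.split("/"):
--         if direc == "static":
--             before_static = False
--         if not before_static:
--             static_path.append(direc)
--     return "/".join(static_path)
-- ===== SOURCE B (Python) =====
-- def strip_static_path(path):
--     parts = path.replace("\\", "/").split("/")
--     if "static" in parts:
--         return "/".join(parts[parts.index("static"):])
--     return ""
-- ===== Notes on version B (the rewrite author's own statement) =====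
-- stated objective: simpler
-- what changed: Replaces A's running before_static flag and per-segment append loop with finding the first 'static' index and joining the tail slice.
import Mathlib
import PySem

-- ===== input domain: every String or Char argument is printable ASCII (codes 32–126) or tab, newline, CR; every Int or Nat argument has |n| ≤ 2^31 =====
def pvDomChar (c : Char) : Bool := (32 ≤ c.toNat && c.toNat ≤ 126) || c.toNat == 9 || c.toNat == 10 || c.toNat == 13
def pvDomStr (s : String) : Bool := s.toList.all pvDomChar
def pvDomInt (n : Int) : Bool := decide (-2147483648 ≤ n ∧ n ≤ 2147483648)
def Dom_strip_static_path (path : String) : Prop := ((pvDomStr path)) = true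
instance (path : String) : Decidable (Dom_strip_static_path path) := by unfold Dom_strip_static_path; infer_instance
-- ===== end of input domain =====

-- B replaces A's running before_static flag and per-segment append with: find the
-- first index of "static" and join the tail slice (objective: simpler).

-- ===== PORT A =====
-- A's loop body (the for-loop over path.split("/") maintaining (static_path, before_static))
def pvStepA (st : List String × Bool) (direc : String) : List String × Bool :=
  let before := if direc == "static" then false else st.2
  if !before then (st.1 ++ [direc], before) else (st.1, before)

def strip_static_path (path : String) : String :=
  let p := PySem.Str.replace path "\\" "/"
  -- sep is the nonempty literal "/", so split? is always some; getD [] is never hit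
  let parts := (PySem.Str.split? p "/").getD []
  let st := parts.foldl pvStepA ([], true)
  PySem.Str.join "/" st.1

-- ===== PORT B =====
def strip_static_path_alt (path : String) : String :=
  let parts := (PySem.Str.split? (PySem.Str.replace path "\\" "/") "/").getD []
  -- '"static" in parts' + 'parts.index("static")' ported as one index? lookup;
  -- 'parts[i:]' with i a nonnegative found index is List.drop i
  match PySem.List.index? parts "static" with
  | some i => PySem.Str.join "/" (parts.drop i)
  | none => ""

-- ===== PRECONDITION & SPEC =====
def Spec_strip_static_path (path : String) (out : String) : Prop := out = strip_static_path_alt path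
instance (path : String) (out : String) : Decidable (Spec_strip_static_path path out) := by unfold Spec_strip_static_path; infer_instance

-- ===== CLAIM (what is proved, stated in full; the proofs are below) =====
def Claim_equal_strip_static_path : Prop := ∀ (path : String), Dom_strip_static_path path → Spec_strip_static_path path (strip_static_path path)

-- ===== LEMMAS AND PROOFS =====

-- once the flag is false it stays false and every remaining segment is appended
theorem pvFoldA_false (l : List String) :
    ∀ acc : List String, l.foldl pvStepA (acc, false) = (acc ++ l, false) := by
  induction l with
  | nil => simp
  | cons x xs ih =>
    intro acc
    simp [pvStepA, List.foldl_cons, ih]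

-- A's loop from the initial state computes the tail from the first "static"
theorem pvFoldA_true (l : List String) :
    l.foldl pvStepA ([], true) =
      (match PySem.List.index? l "static" with
       | some i => l.drop i
       | none => ([] : List String),
       (PySem.List.index? l "static").isNone) := by
  induction l with
  | nil => rfl
  | cons x xs ih =>
    rw [List.foldl_cons]
    by_cases hx : x = "static"
    · subst hx
      have hstep : pvStepA ([], true) "static" = (["static"], false) := by
        simp [pvStepA]
      rw [hstep, pvFoldA_false, PySem.List.index?_cons_self]
      simp
    · have hstep : pvStepA ([], true) x = ([], true) := by
        simp [pvStepA, hx]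
      rw [hstep, ih, PySem.List.index?_cons_of_ne xs hx]
      cases PySem.List.index? xs "static" <;> simp

theorem strip_static_path_eq (path : String) :
    strip_static_path path = strip_static_path_alt path := by
  unfold strip_static_path strip_static_path_alt
  simp only [pvFoldA_true]
  cases PySem.List.index?
      ((PySem.Str.split? (PySem.Str.replace path "\\" "/") "/").getD []) "static" <;>
    simp [PySem.Str.join]

-- ===== VERDICT (by name: the statement is the Claim_ definition above) =====
theorem strip_static_path_spec : Claim_equal_strip_static_path := by
  intro path _
  exact strip_static_path_eq path
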